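-- pv_equiv track=rewrite | github.com/fulL549/Algorithm_Design_and_Analysis | homework1/main.py | get_allocation_details
-- ===== SOURCE A (Python) =====
-- from typing import List
--
-- def get_allocation_details(pages: List[int], m: int, max_allowed: int) -> List[List[int]]:
--     """返回具体的分配方案，用于调试和展示。"""
--     # 特殊情况：学生数等于书本数
--     if m == len(pages):
--         return [[pages[i]] for i in range(len(pages))]
--
--     allocation = []
--     current_group = []
--     current_sum = 0
--
--     # 按贪心算法进行初始分配
--     for p in pages:
--         if current_sum + p <= max_allowed:
--             current_group.append(p)
--             current_sum += p
--         else: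
--             if current_group:
--                 allocation.append(current_group)
--             current_group = [p]
--             current_sum = p
--
--     if current_group:
--         allocation.append(current_group)
--
--     # 如果分配的组数少于学生数，需要进一步分割
--     while len(allocation) < m:
--         # 找到书本数最多且页数最多的组进行分割
--         best_group_idx = -1
--         best_books_count = 0
--         best_sum = 0
--
--         for i, group in enumerate(allocation):
--             if len(group) > best_books_count or (len(group) == best_books_count and sum(group) > best_sum):
--                 if len(group) > 1:  # 只有多于一本书的组才能分割
--                     best_group_idx = i
--                     best_books_count = len(group)
--                     best_sum = sum(group)
--
--         if best_group_idx == -1: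
--             # 无法继续分割，说明已经达到最优分配
--             break
--
--         # 分割选中的组
--         group_to_split = allocation[best_group_idx]
--         # 将最后一本书分出来作为新组
--         last_book = group_to_split.pop()
--         allocation.append([last_book])
--
--     return allocation
-- ===== SOURCE B (Python) =====
-- from typing import List
--
-- def get_allocation_details(pages: List[int], m: int, max_allowed: int) -> List[List[int]]:
--     if m == len(pages):
--         return [[p] for p in pages]
--
--     # greedy first pass into groups (and their running sums)
--     groups = []
--     sums = []
--     for p in pages:
--         if sums and sums[-1] + p <= max_allowed:
--             groups[-1].append(p)
--             sums[-1] += p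
--         else:
--             groups.append([p])
--             sums.append(p)
--
--     # Every split the iterative greedy would ever perform is a pair (group i, level L):
--     # popping group i down from length L to L-1, with key (L, prefix_sum_i(L), i).
--     # Splits happen in decreasing key order, so sort all events once and take what we need.
--     need = m - len(groups)
--     if need > 0:
--         events = []
--         for i, g in enumerate(groups):
--             pre = 0
--             for L, p in enumerate(g, 1):
--                 pre += p
--                 if L >= 2:
--                     events.append((-L, -pre, i))
--         events.sort()
--         take = events[:need]
--     else:
--         take = []
--
--     pops = [0] * len(groups)
--     extras = []
--     for negL, negS, i in take:
--         pops[i] += 1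
--         extras.append([groups[i][-negL - 1]])
--
--     return [g[:len(g) - pops[i]] for i, g in enumerate(groups)] + extras
-- ===== Notes on version B (the rewrite author's own statement) =====
-- stated objective: alternative
-- what changed: A's split phase repeatedly rescans every group and recomputes sum(group) each while-loop iteration; B precomputes every possible split as an event (-length, -prefix_sum, group_index), sorts all events once (Python tuple order = the order in which A performs its splits), takes the needed prefix, and assembles the whole answer in one pass.
import Mathlib
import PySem

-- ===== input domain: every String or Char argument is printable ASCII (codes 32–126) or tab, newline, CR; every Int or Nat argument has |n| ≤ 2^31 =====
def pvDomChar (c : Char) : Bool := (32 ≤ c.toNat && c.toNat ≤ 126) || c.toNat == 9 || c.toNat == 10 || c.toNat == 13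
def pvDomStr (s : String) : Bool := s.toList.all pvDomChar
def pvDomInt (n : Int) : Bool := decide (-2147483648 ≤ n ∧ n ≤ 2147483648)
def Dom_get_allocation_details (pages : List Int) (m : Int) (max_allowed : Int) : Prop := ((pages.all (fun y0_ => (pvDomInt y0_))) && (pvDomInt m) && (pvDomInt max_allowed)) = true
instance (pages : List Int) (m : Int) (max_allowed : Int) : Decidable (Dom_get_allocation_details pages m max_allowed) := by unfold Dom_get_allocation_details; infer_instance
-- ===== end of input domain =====

-- B replaces A's whole split loop (rescan all groups, pop, repeat) by one sort: every split A could
-- ever perform is an event (-length, -prefix_sum, group); A performs them in increasing event order,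
-- so B sorts the events once, takes the needed prefix, and assembles the result in one pass.

-- ===== PORT A =====

-- the greedy first pass: state (allocation, current_group, current_sum)
def aGreedy (max_allowed : Int) (pages : List Int) : List (List Int) × List Int × Int :=
  pages.foldl (fun (st : List (List Int) × List Int × Int) p =>
    if st.2.2 + p ≤ max_allowed then (st.1, st.2.1 ++ [p], st.2.2 + p)
    else ((if st.2.1.isEmpty then st.1 else st.1 ++ [st.2.1]), [p], p)) ([], [], 0)

-- the inner 'for i, group in enumerate(allocation)' scan for the best splittable group
def aScan (alloc : List (List Int)) : Int × Int × Int :=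
  (PySem.List.enumerate alloc).foldl (fun st ig =>
    if st.2.1 < (ig.2.length : Int) ∨ ((ig.2.length : Int) = st.2.1 ∧ st.2.2 < ig.2.sum) then
      (if (1 : Int) < (ig.2.length : Int) then (ig.1, (ig.2.length : Int), ig.2.sum) else st)
    else st) (-1, 0, 0)

-- the 'while len(allocation) < m' splitting loop
def aLoop (m : Int) (alloc : List (List Int)) : List (List Int) :=
  if _h : (alloc.length : Int) < m then
    if (aScan alloc).1 = -1 then alloc
    else
      match PySem.List.pyGet? alloc (aScan alloc).1 with
      | none => alloc          -- unreachable guard: the best index is valid when ≠ -1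
      | some g =>
        match PySem.List.pop? g (-1) with
        | none => alloc        -- unreachable guard: the selected group has more than one book
        | some lb => aLoop m ((alloc.set (aScan alloc).1.toNat lb.2) ++ [[lb.1]])
  else alloc
  termination_by (m - alloc.length).toNat
  decreasing_by simp; omega

def get_allocation_details (pages : List Int) (m : Int) (max_allowed : Int) : List (List Int) :=
  if m = (pages.length : Int) then
    (PySem.List.pyRange 0 pages.length 1).map (fun i => [PySem.List.pyGetD pages i 0])
  else
    aLoop m
      (if (aGreedy max_allowed pages).2.1.isEmpty then (aGreedy max_allowed pages).1
       else (aGreedy max_allowed pages).1 ++ [(aGreedy max_allowed pages).2.1])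

-- ===== PORT B =====

-- greedy first pass carrying two parallel lists (groups, sums), as in Source B
def bGreedy2 (max_allowed : Int) (pages : List Int) : List (List Int) × List Int :=
  pages.foldl (fun (st : List (List Int) × List Int) p =>
    match st.2.getLast? with
    | some s =>
      if s + p ≤ max_allowed then
        (st.1.dropLast ++ [st.1.getLast?.getD [] ++ [p]], st.2.dropLast ++ [s + p])
      else (st.1 ++ [[p]], st.2 ++ [p])
    | none => ([[p]], [p])) ([], [])

-- Python compares tuples lexicographically: evKey renders the tuple (-L, -S, i) in the lex order
def evKey (e : Int × Int × Int) : Lex (Int × Lex (Int × Int)) := toLex (e.1, toLex (e.2.1, e.2.2))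

-- the nested event-building loops of Source B: for each group an inner pass with running prefix sum
def bEvents (groups : List (List Int)) : List (Int × Int × Int) :=
  (PySem.List.enumerate groups).foldl (fun acc ig =>
    ((PySem.List.enumerate ig.2 1).foldl
      (fun (st : Int × List (Int × Int × Int)) Lp =>
        (st.1 + Lp.2, if 2 ≤ Lp.1 then st.2 ++ [(-Lp.1, -(st.1 + Lp.2), ig.1)] else st.2))
      (0, acc)).2) []

-- take = events[:need] if need > 0 else []
def bTake (groups : List (List Int)) (m : Int) : List (Int × Int × Int) :=
  if 0 < m - (groups.length : Int) then
    PySem.List.slice (PySem.List.sorted (bEvents groups) evKey false) none (some (m - (groups.length : Int)))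
  else []

-- the single pass over take: pops[i] += 1 and extras.append([groups[i][-negL-1]])
def bPopsExtras (groups : List (List Int)) (take : List (Int × Int × Int)) :
    List Int × List (List Int) :=
  take.foldl (fun (st : List Int × List (List Int)) e =>
    (PySem.List.pySetD st.1 e.2.2 (PySem.List.pyGetD st.1 e.2.2 0 + 1),
     st.2 ++ [[PySem.List.pyGetD (PySem.List.pyGetD groups e.2.2 []) (-e.1 - 1) 0]]))
    (List.replicate groups.length 0, [])

def get_allocation_details_alt (pages : List Int) (m : Int) (max_allowed : Int) : List (List Int) :=
  if m = (pages.length : Int) then pages.map (fun p => [p])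
  else
    (PySem.List.enumerate (bGreedy2 max_allowed pages).1).map (fun ig =>
      PySem.List.slice ig.2 none (some ((ig.2.length : Int) -
        PySem.List.pyGetD (bPopsExtras (bGreedy2 max_allowed pages).1
          (bTake (bGreedy2 max_allowed pages).1 m)).1 ig.1 0))) ++
    (bPopsExtras (bGreedy2 max_allowed pages).1 (bTake (bGreedy2 max_allowed pages).1 m)).2

-- ===== PRECONDITION & SPEC =====
def Spec_get_allocation_details (pages : List Int) (m : Int) (max_allowed : Int) (out : List (List Int)) : Prop := out = get_allocation_details_alt pages m max_allowed
instance (pages : List Int) (m : Int) (max_allowed : Int) (out : List (List Int)) : Decidable (Spec_get_allocation_details pages m max_allowed out) := by unfold Spec_get_allocation_details; infer_instance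

-- ===== CLAIM (what is proved, stated in full; the proofs are below) =====
def Claim_equal_get_allocation_details : Prop := ∀ (pages : List Int) (m : Int) (max_allowed : Int), Dom_get_allocation_details pages m max_allowed → Spec_get_allocation_details pages m max_allowed (get_allocation_details pages m max_allowed)

-- ===== LEMMAS AND PROOFS =====

-- ---- proof-only intermediate: A's split loop over cached state (full, lens, sums, extra) ----

-- A's allocation, reconstructed from the intermediate state: prefixes of initial groups + singletons
def outOf (full : List (List Int)) (lens : List Int) (extra : List (List Int)) : List (List Int) :=
  (List.range full.length).map (fun i => (full.getD i []).take (lens.getD i 0).toNat) ++ extra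

def LoopInv (full : List (List Int)) (lens sums : List Int) : Prop :=
  lens.length = full.length ∧ sums.length = full.length ∧
  (∀ i, i < full.length → 1 ≤ lens.getD i 0 ∧ lens.getD i 0 ≤ ((full.getD i []).length : Int)) ∧
  (∀ i, i < full.length → sums.getD i 0 = ((full.getD i []).take (lens.getD i 0).toNat).sum)

def bScan (n : Nat) (lens sums : List Int) : Int × Int × Int :=
  (PySem.List.pyRange 0 (n : Int) 1).foldl (fun st i =>
    let l := PySem.List.pyGetD lens i 0
    let s := PySem.List.pyGetD sums i 0
    if 1 < l ∧ (st.2.1 < l ∨ (l = st.2.1 ∧ st.2.2 < s)) then (i, l, s) else st) (-1, 0, 0)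

def bLoop (m : Int) (full : List (List Int)) (lens sums : List Int) (extra : List (List Int)) :
    List Int × List (List Int) :=
  if _h : ((full.length : Int) + (extra.length : Int)) < m then
    if (bScan full.length lens sums).1 < 0 then (lens, extra)
    else
      bLoop m full
        (PySem.List.pySetD lens (bScan full.length lens sums).1
          (PySem.List.pyGetD lens (bScan full.length lens sums).1 0 - 1))
        (PySem.List.pySetD sums (bScan full.length lens sums).1
          (PySem.List.pyGetD sums (bScan full.length lens sums).1 0 -
            PySem.List.pyGetD (PySem.List.pyGetD full (bScan full.length lens sums).1 [])
              (PySem.List.pyGetD lens (bScan full.length lens sums).1 0 - 1) 0))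
        (extra ++ [[PySem.List.pyGetD (PySem.List.pyGetD full (bScan full.length lens sums).1 [])
              (PySem.List.pyGetD lens (bScan full.length lens sums).1 0 - 1) 0]])
  else (lens, extra)
  termination_by (m - (full.length + extra.length)).toNat
  decreasing_by simp; omega

-- pairs-version greedy, the hinge between aGreedy and bGreedy2
def bGreedy (max_allowed : Int) (pages : List Int) : List (List Int × Int) :=
  pages.foldl (fun (gs : List (List Int × Int)) p =>
    match gs.getLast? with
    | some gl => if gl.2 + p ≤ max_allowed then gs.dropLast ++ [(gl.1 ++ [p], gl.2 + p)]
                 else gs ++ [([p], p)]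
    | none => [([p], p)]) []

-- the two per-group scan steps coincide as pure functions of (index, length, sum)
theorem step_cases (i l s : Int) (st : Int × Int × Int) :
    (if st.2.1 < l ∨ (l = st.2.1 ∧ st.2.2 < s) then (if (1 : Int) < l then (i, l, s) else st) else st)
    = (if 1 < l ∧ (st.2.1 < l ∨ (l = st.2.1 ∧ st.2.2 < s)) then (i, l, s) else st) := by
  split_ifs <;> tauto

-- the singleton groups at the tail of the allocation never change A's scan state
theorem aScan_extra_id (ex : List (List Int)) (hex : ∀ e ∈ ex, e.length = 1) :
    ∀ (s : Int) (st : Int × Int × Int),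
      (PySem.List.enumerate ex s).foldl (fun st ig =>
        if st.2.1 < (ig.2.length : Int) ∨ ((ig.2.length : Int) = st.2.1 ∧ st.2.2 < ig.2.sum) then
          (if (1 : Int) < (ig.2.length : Int) then (ig.1, (ig.2.length : Int), ig.2.sum) else st)
        else st) st = st := by
  induction ex with
  | nil => intro s st; simp [PySem.List.enumerate]
  | cons e t ih =>
    intro s st
    have he : ((e.length : Int)) = 1 := by
      have := hex e (by simp); omega
    rw [PySem.List.enumerate_cons]
    simp only [List.foldl_cons, he]
    have hstep : (if st.2.1 < (1:Int) ∨ ((1:Int) = st.2.1 ∧ st.2.2 < e.sum) then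
        (if (1:Int) < (1:Int) then (s, (1:Int), e.sum) else st) else st) = st := by
      split_ifs with h1 h2
      · omega
      · rfl
      · rfl
    rw [hstep]
    exact ih (fun e he => hex e (by simp [he])) (s+1) st

theorem scan_eq (full : List (List Int)) (lens sums : List Int) (extra : List (List Int))
    (hinv : LoopInv full lens sums) (hex : ∀ e ∈ extra, e.length = 1) :
    aScan (outOf full lens extra) = bScan full.length lens sums := by
  obtain ⟨hl, hs, hb, hsum⟩ := hinv
  unfold aScan bScan outOf
  rw [PySem.List.enumerate_append, List.foldl_append, aScan_extra_id extra hex]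
  rw [PySem.List.enumerate_eq_map_pyRange _ ([] : List Int), List.foldl_map]
  have hn : PySem.List.len ((List.range full.length).map
      (fun i => (full.getD i []).take (lens.getD i 0).toNat)) = (full.length : Int) := by
    simp [PySem.List.len]
  rw [hn]
  apply PySem.List.foldl_congr_mem
  intro acc x hx
  rw [PySem.List.mem_pyRange_one] at hx
  have hx0 : 0 ≤ x := hx.1
  have hxn : x.toNat < full.length := by omega
  have hget : PySem.List.pyGetD ((List.range full.length).map
      (fun i => (full.getD i []).take (lens.getD i 0).toNat)) x []
      = (full.getD x.toNat []).take (lens.getD x.toNat 0).toNat := by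
    rw [PySem.List.pyGetD_eq_getElem _ _ hx0 (by simpa using hx.2)]
    simp
  have hblens := hb x.toNat hxn
  have hlen : ((((full.getD x.toNat []).take (lens.getD x.toNat 0).toNat).length : Nat) : Int)
      = lens.getD x.toNat 0 := by
    rw [List.length_take]
    omega
  have hsum' : ((full.getD x.toNat []).take (lens.getD x.toNat 0).toNat).sum
      = sums.getD x.toNat 0 := (hsum x.toNat hxn).symm
  simp only [hget, hlen, hsum', PySem.List.pyGetD_of_nonneg _ _ hx0]
  exact step_cases x _ _ acc

theorem bScan_post (n : Nat) (lens sums : List Int) :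
    (bScan n lens sums).1 = -1 ∨
    ∃ k : Nat, (bScan n lens sums).1 = (k : Int) ∧ k < n ∧
      (bScan n lens sums).2.1 = lens.getD k 0 ∧ (bScan n lens sums).2.2 = sums.getD k 0 ∧
      1 < lens.getD k 0 := by
  unfold bScan
  have main : ∀ (l : List Int) (st : Int × Int × Int),
      (∀ j ∈ l, 0 ≤ j ∧ j < (n : Int)) →
      (st = (-1, 0, 0) ∨ ∃ k : Nat, st.1 = (k : Int) ∧ k < n ∧
        st.2.1 = lens.getD k 0 ∧ st.2.2 = sums.getD k 0 ∧ 1 < lens.getD k 0) →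
      (let r := l.foldl (fun st i =>
          let l := PySem.List.pyGetD lens i 0
          let s := PySem.List.pyGetD sums i 0
          if 1 < l ∧ (st.2.1 < l ∨ (l = st.2.1 ∧ st.2.2 < s)) then (i, l, s) else st) st
       r = (-1, 0, 0) ∨ ∃ k : Nat, r.1 = (k : Int) ∧ k < n ∧
        r.2.1 = lens.getD k 0 ∧ r.2.2 = sums.getD k 0 ∧ 1 < lens.getD k 0) := by
    intro l
    induction l with
    | nil => intro st _ hst; exact hst
    | cons j t ih =>
      intro st hj hst
      simp only [List.foldl_cons]
      apply ih _ (fun x hx => hj x (by simp [hx]))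
      have hj0 := (hj j (by simp)).1
      simp only [PySem.List.pyGetD_of_nonneg _ _ hj0]
      by_cases hc : 1 < lens.getD j.toNat 0 ∧
          (st.2.1 < lens.getD j.toNat 0 ∨
            (lens.getD j.toNat 0 = st.2.1 ∧ st.2.2 < sums.getD j.toNat 0))
      · right
        refine ⟨j.toNat, ?_⟩
        rw [if_pos hc]
        exact ⟨by omega, by have := (hj j (by simp)).2; omega, rfl, rfl, hc.1⟩
      · rw [if_neg hc]; exact hst
  rcases main (PySem.List.pyRange 0 (n : Int) 1) (-1, 0, 0)
      (fun j hj => by rw [PySem.List.mem_pyRange_one] at hj; exact hj) (Or.inl rfl) with h | h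
  · left; rw [h]
  · right; exact h

theorem lens_nonneg (full : List (List Int)) (lens sums : List Int)
    (hinv : LoopInv full lens sums) : ∀ x ∈ lens, 0 ≤ x := by
  intro x hx
  obtain ⟨i, hi, hxe⟩ := List.mem_iff_getElem.mp hx
  have h1 := (hinv.2.2.1 i (by rw [← hinv.1]; exact hi)).1
  rw [List.getD_eq_getElem _ _ hi, hxe] at h1
  omega

theorem getD_set_self' (xs : List Int) (k : Nat) (v : Int) (h : k < xs.length) :
    (xs.set k v).getD k 0 = v := by
  rw [List.getD_eq_getElem _ _ (by simpa using h)]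
  simp

theorem getD_set_ne' (xs : List Int) (k j : Nat) (v : Int) (h : j ≠ k) :
    (xs.set k v).getD j 0 = xs.getD j 0 := by
  rcases Nat.lt_or_ge j xs.length with hj | hj
  · rw [List.getD_eq_getElem _ _ (by simpa using hj), List.getD_eq_getElem _ _ hj,
      List.getElem_set_ne (fun hh => h hh.symm)]
  · rw [List.getD_eq_default _ _ (by simpa using hj), List.getD_eq_default _ _ hj]

theorem loop_eq_aux (m : Int) (full : List (List Int)) :
    ∀ (fuel : Nat) (lens sums : List Int) (extra : List (List Int)),
    (m - ((full.length : Int) + (extra.length : Int))).toNat = fuel →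
    LoopInv full lens sums → (∀ e ∈ extra, e.length = 1) →
    aLoop m (outOf full lens extra) =
      outOf full (bLoop m full lens sums extra).1 (bLoop m full lens sums extra).2 ∧
    (∀ x ∈ (bLoop m full lens sums extra).1, 0 ≤ x) := by
  intro fuel
  induction fuel using Nat.strong_induction_on with
  | _ fuel ih =>
  intro lens sums extra hfuel hinv hex
  obtain ⟨hl, hs, hb, hsum⟩ := hinv
  have hout_len : (outOf full lens extra).length = full.length + extra.length := by
    simp [outOf]
  rw [aLoop, bLoop]
  by_cases hguard : ((full.length : Int) + (extra.length : Int)) < m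
  · rw [dif_pos (by rw [hout_len]; push_cast; omega), dif_pos hguard]
    have hscan := scan_eq full lens sums extra ⟨hl, hs, hb, hsum⟩ hex
    rcases bScan_post full.length lens sums with hneg | ⟨k, hk1, hkn, hkl, hks, hkgt⟩
    · rw [hscan, hneg]
      norm_num
      exact lens_nonneg full lens sums ⟨hl, hs, hb, hsum⟩
    · have hbk := hb k hkn
      have hsumk := hsum k hkn
      set fk := full.getD k [] with hfk
      set l := lens.getD k 0 with hldef
      obtain ⟨n1, hn1⟩ : ∃ n1, l.toNat = n1 + 1 := ⟨l.toNat - 1, by omega⟩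
      have hidx : (l - 1).toNat = n1 := by omega
      have hn1len : n1 < fk.length := by omega
      have hkne : ¬ ((bScan full.length lens sums).1 = -1) := by rw [hk1]; omega
      have hknneg : ¬ ((bScan full.length lens sums).1 < 0) := by rw [hk1]; omega
      rw [hscan, if_neg hkne, if_neg hknneg, hk1]
      have hbook : PySem.List.pyGetD fk (l - 1) 0 = fk[n1] := by
        rw [PySem.List.pyGetD_of_nonneg _ _ (by omega), hidx]
        exact List.getD_eq_getElem _ _ hn1len
      have hklen : k < (outOf full lens extra).length := by omega
      have hpyget : PySem.List.pyGet? (outOf full lens extra) (k : Int)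
          = some ((outOf full lens extra)[k]) := by
        rw [PySem.List.pyGet?_natCast]
        exact List.getElem?_eq_getElem hklen
      have hgval : (outOf full lens extra)[k] = fk.take l.toNat := by
        unfold outOf
        rw [List.getElem_append_left (by simp; omega)]
        simp only [List.getElem_map, List.getElem_range]
        rw [hfk, hldef]
      have hdecomp : fk.take l.toNat = fk.take n1 ++ [fk[n1]] := by
        rw [hn1, List.take_add_one, List.getElem?_eq_getElem hn1len]
        simp
      have hpop : PySem.List.pop? (fk.take l.toNat) (-1) = some (fk[n1], fk.take n1) := by
        rw [hdecomp]; exact PySem.List.pop?_last _ _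
      have htk : fk.take (l.toNat - 1) = fk.take n1 := by rw [hn1]; simp
      simp only [hpyget, hgval, hpop, Int.toNat_natCast,
        PySem.List.pyGetD_natCast, PySem.List.pySetD_natCast]
      rw [← hfk, ← hldef, hbook]
      set book := fk[n1] with hbdef
      set lens' := lens.set k (l - 1) with hlens'
      set sums' := sums.set k (sums.getD k 0 - book) with hsums'
      have harg : (outOf full lens extra).set k (fk.take n1) ++ [[book]]
          = outOf full lens' (extra ++ [[book]]) := by
        unfold outOf
        rw [List.set_append_left _ _ (by simp; omega)]
        have hmap : ((List.range full.length).map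
              (fun i => (full.getD i []).take (lens.getD i 0).toNat)).set k (fk.take n1)
            = (List.range full.length).map
              (fun i => (full.getD i []).take (lens'.getD i 0).toNat) := by
          apply List.ext_getElem (by simp)
          intro j hj1 hj2
          have hjn : j < full.length := by simpa using hj2
          rw [List.getElem_set]
          simp only [List.getElem_map, List.getElem_range]
          by_cases hjk : j = k
          · subst hjk
            rw [if_pos rfl]
            have hg : lens'.getD j 0 = l - 1 := by
              rw [hlens']; exact getD_set_self' _ _ _ (by omega)
            rw [hg, ← hfk, hidx]
          · rw [if_neg (fun h => hjk h.symm)]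
            have hg : lens'.getD j 0 = lens.getD j 0 := by
              rw [hlens']; exact getD_set_ne' _ _ _ _ hjk
            rw [hg]
        rw [hmap, List.append_assoc]
      rw [harg]
      have hinv' : LoopInv full lens' sums' := by
        refine ⟨by simp [hlens', hl], by simp [hsums', hs], ?_, ?_⟩
        · intro i hi
          by_cases hik : i = k
          · subst hik
            have h1 : lens'.getD i 0 = l - 1 := by
              rw [hlens']; exact getD_set_self' _ _ _ (by omega)
            rw [h1, ← hfk]
            constructor <;> omega
          · have h1 : lens'.getD i 0 = lens.getD i 0 := by
              rw [hlens']; exact getD_set_ne' _ _ _ _ hik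
            rw [h1]
            exact hb i hi
        · intro i hi
          by_cases hik : i = k
          · subst hik
            have h1 : lens'.getD i 0 = l - 1 := by
              rw [hlens']; exact getD_set_self' _ _ _ (by omega)
            have h2 : sums'.getD i 0 = sums.getD i 0 - book := by
              rw [hsums']; exact getD_set_self' _ _ _ (by omega)
            have h4 := List.sum_take_succ fk n1 hn1len
            rw [← hn1] at h4
            rw [h1, h2, hsumk, ← hfk, hidx]
            omega
          · have h1 : lens'.getD i 0 = lens.getD i 0 := by
              rw [hlens']; exact getD_set_ne' _ _ _ _ hik
            have h2 : sums'.getD i 0 = sums.getD i 0 := by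
              rw [hsums']; exact getD_set_ne' _ _ _ _ hik
            rw [h1, h2]
            exact hsum i hi
      have hex' : ∀ e ∈ extra ++ [[book]], e.length = 1 := by
        intro e he
        rcases List.mem_append.mp he with h | h
        · exact hex e h
        · simp at h; simp [h]
      exact ih (m - ((full.length : Int) + ((extra ++ [[book]]).length : Int))).toNat
        (by simp; omega) lens' sums' (extra ++ [[book]]) rfl hinv' hex'
  · rw [dif_neg (by rw [hout_len]; push_cast; omega), dif_neg hguard]
    exact ⟨rfl, lens_nonneg full lens sums ⟨hl, hs, hb, hsum⟩⟩

-- invariant linking A's greedy pass to the pairs-version greedy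
def GP (a : List (List Int) × List Int × Int) (gs : List (List Int × Int)) : Prop :=
  gs.map (·.1) = (if a.2.1.isEmpty then a.1 else a.1 ++ [a.2.1]) ∧
  (∀ q ∈ gs, q.1 ≠ [] ∧ q.2 = q.1.sum) ∧
  (a.2.1 = [] → a.1 = [] ∧ a.2.2 = 0 ∧ gs = []) ∧
  (a.2.1 ≠ [] → gs.getLast? = some (a.2.1, a.2.2))

theorem GP_step (mx : Int) (a : List (List Int) × List Int × Int) (gs : List (List Int × Int))
    (h : GP a gs) (p : Int) :
    GP (if a.2.2 + p ≤ mx then (a.1, a.2.1 ++ [p], a.2.2 + p)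
        else ((if a.2.1.isEmpty then a.1 else a.1 ++ [a.2.1]), [p], p))
       (match gs.getLast? with
        | some gl => if gl.2 + p ≤ mx then gs.dropLast ++ [(gl.1 ++ [p], gl.2 + p)]
                     else gs ++ [([p], p)]
        | none => [([p], p)]) := by
  obtain ⟨alloc, cg, cs⟩ := a
  obtain ⟨h1, h2, h3, h4⟩ := h
  by_cases hcg : cg = []
  · obtain ⟨ha, hc, hg⟩ := h3 hcg
    subst hcg hg ha
    have hc' : cs = 0 := hc
    subst hc'
    rw [List.getLast?_nil]
    by_cases hle : p ≤ mx
    · simp [GP, hle]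
    · simp [GP, hle]
  · have hlast := h4 hcg
    obtain ⟨dl, hgs⟩ := List.getLast?_eq_some_iff.mp hlast
    subst hgs
    rw [List.getLast?_concat]
    dsimp only
    have hcs : cs = cg.sum := (h2 (cg, cs) (by simp)).2
    have hcge : cg.isEmpty = false := by simpa using hcg
    rw [hcge] at h1 ⊢
    simp only [Bool.false_eq_true, if_false] at h1 ⊢
    rw [List.map_append] at h1
    simp only [List.map_cons, List.map_nil] at h1
    have hdl : dl.map (·.1) = alloc := by
      have := congrArg List.dropLast h1
      simpa using this
    by_cases hle : cs + p ≤ mx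
    · rw [if_pos hle, if_pos hle, List.dropLast_concat]
      refine ⟨?_, ?_, by simp, by simp⟩
      · simp [hdl]
      · intro q hq
        rcases List.mem_append.mp hq with hq | hq
        · exact h2 q (by simp [hq])
        · simp at hq
          subst hq
          simp [hcs, hcg]
    · rw [if_neg hle, if_neg hle]
      refine ⟨?_, ?_, by simp, by simp⟩
      · simp [hdl]
      · intro q hq
        rcases List.mem_append.mp hq with hq | hq
        · exact h2 q hq
        · simp at hq
          subst hq
          simp

theorem greedy_inv (mx : Int) (pages : List Int) :
    GP (aGreedy mx pages) (bGreedy mx pages) := by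
  unfold aGreedy bGreedy
  induction pages using List.reverseRecOn with
  | nil =>
    exact ⟨rfl, by simp, fun _ => ⟨rfl, rfl, rfl⟩, fun h => absurd rfl h⟩
  | append_singleton xs p ih =>
    rw [List.foldl_append, List.foldl_append]
    simp only [List.foldl_cons, List.foldl_nil]
    exact GP_step mx _ _ ih p

-- B's greedy pass computes the (groups, sums) projections of the pairs-version greedy
theorem bGreedy2_eq (mx : Int) (pages : List Int) :
    bGreedy2 mx pages = ((bGreedy mx pages).map (·.1), (bGreedy mx pages).map (·.2)) := by
  unfold bGreedy2 bGreedy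
  induction pages using List.reverseRecOn with
  | nil => simp
  | append_singleton xs p ih =>
    rw [List.foldl_append, List.foldl_append, ih]
    simp only [List.foldl_cons, List.foldl_nil]
    set gs := xs.foldl (fun (gs : List (List Int × Int)) p =>
      match gs.getLast? with
      | some gl => if gl.2 + p ≤ mx then gs.dropLast ++ [(gl.1 ++ [p], gl.2 + p)]
                   else gs ++ [([p], p)]
      | none => [([p], p)]) [] with hgs
    cases hlast : gs.getLast? with
    | none =>
      rw [List.getLast?_eq_none_iff.mp hlast]
      simp
    | some gl =>
      have h1 : (gs.map (·.1)).getLast? = some gl.1 := by rw [List.getLast?_map, hlast]; rfl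
      have h2 : (gs.map (·.2)).getLast? = some gl.2 := by rw [List.getLast?_map, hlast]; rfl
      simp only [h1, h2]
      by_cases hle : gl.2 + p ≤ mx
      · rw [if_pos hle, if_pos hle]
        simp [List.map_dropLast]
      · rw [if_neg hle, if_neg hle]
        simp

-- ---- the canonical event list and its properties ----

-- events of one group, positions s, s+1, … with running prefix sum pre
def evtsFrom (i : Int) : Int → Int → List Int → List (Int × Int × Int)
  | _, _, [] => []
  | s, pre, p :: t =>
    (if 2 ≤ s then [(-s, -(pre + p), i)] else []) ++ evtsFrom i (s + 1) (pre + p) t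

def evtsG (i : Int) (g : List Int) : List (Int × Int × Int) := evtsFrom i 1 0 g

theorem mem_evtsFrom (i : Int) (g : List Int) : ∀ (s pre : Int) (e : Int × Int × Int),
    e ∈ evtsFrom i s pre g ↔
      ∃ j : Nat, j < g.length ∧ 2 ≤ s + (j : Int) ∧
        e = (-(s + (j : Int)), -(pre + (g.take (j + 1)).sum), i) := by
  induction g with
  | nil => intro s pre e; simp [evtsFrom]
  | cons p t ih =>
    intro s pre e
    simp only [evtsFrom, List.mem_append]
    rw [ih (s + 1) (pre + p)]
    constructor
    · rintro (h | ⟨j, hj, h2, rfl⟩)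
      · split_ifs at h with hs
        · simp only [List.mem_singleton] at h
          exact ⟨0, by simp, by push_cast; omega, by simp [h]⟩
        · simp at h
      · refine ⟨j + 1, by simp; omega, by push_cast; omega, ?_⟩
        simp only [List.take_succ_cons, List.sum_cons]
        push_cast
        ring_nf
    · rintro ⟨j, hj, h2, rfl⟩
      cases j with
      | zero =>
        left
        rw [if_pos (by push_cast at h2; omega)]
        simp
      | succ j' =>
        right
        refine ⟨j', by simp at hj; omega, by push_cast at h2 ⊢; omega, ?_⟩
        simp only [List.take_succ_cons, List.sum_cons]
        push_cast
        ring_nf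

theorem nodup_evtsFrom (i : Int) (g : List Int) : ∀ (s pre : Int),
    (evtsFrom i s pre g).Nodup := by
  induction g with
  | nil => intro s pre; simp [evtsFrom]
  | cons p t ih =>
    intro s pre
    simp only [evtsFrom]
    split_ifs with hs
    · simp only [List.singleton_append, List.nodup_cons]
      refine ⟨?_, ih _ _⟩
      intro hmem
      rw [mem_evtsFrom] at hmem
      obtain ⟨j, _, _, he⟩ := hmem
      have := congrArg Prod.fst he
      simp at this
      omega
    · simpa using ih (s + 1) (pre + p)

theorem inner_ev (i : Int) (g : List Int) : ∀ (s pre : Int) (acc : List (Int × Int × Int)),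
    (PySem.List.enumerate g s).foldl
      (fun (st : Int × List (Int × Int × Int)) Lp =>
        (st.1 + Lp.2, if 2 ≤ Lp.1 then st.2 ++ [(-Lp.1, -(st.1 + Lp.2), i)] else st.2))
      (pre, acc)
    = (pre + g.sum, acc ++ evtsFrom i s pre g) := by
  induction g with
  | nil => intro s pre acc; simp [PySem.List.enumerate_nil, evtsFrom]
  | cons p t ih =>
    intro s pre acc
    rw [PySem.List.enumerate_cons]
    simp only [List.foldl_cons]
    rw [ih (s + 1) (pre + p)]
    simp only [evtsFrom]
    split_ifs with hs <;> simp <;> ring_nf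

-- Source B's event loops build exactly the concatenation of the per-group canonical events
theorem bEvents_eq (groups : List (List Int)) :
    bEvents groups = (PySem.List.enumerate groups).flatMap (fun ig => evtsG ig.1 ig.2) := by
  unfold bEvents
  have step1 : (PySem.List.enumerate groups).foldl (fun acc ig =>
        ((PySem.List.enumerate ig.2 1).foldl
          (fun (st : Int × List (Int × Int × Int)) Lp =>
            (st.1 + Lp.2, if 2 ≤ Lp.1 then st.2 ++ [(-Lp.1, -(st.1 + Lp.2), ig.1)] else st.2))
          (0, acc)).2) []
      = (PySem.List.enumerate groups).foldl (fun acc ig => acc ++ evtsG ig.1 ig.2) [] := by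
    apply PySem.List.foldl_congr_mem
    intro acc x _
    rw [inner_ev x.1 x.2 1 0 acc]
    simp [evtsG]
  rw [step1, PySem.List.foldl_append_eq_flatMap]
  simp

theorem flat_snd_ge (gs : List (List Int)) : ∀ (s : Int) (e : Int × Int × Int),
    e ∈ (PySem.List.enumerate gs s).flatMap (fun ig => evtsG ig.1 ig.2) → s ≤ e.2.2 := by
  induction gs with
  | nil => intro s e h; simp [PySem.List.enumerate_nil] at h
  | cons g t ih =>
    intro s e h
    rw [PySem.List.enumerate_cons] at h
    simp only [List.flatMap_cons, List.mem_append] at h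
    rcases h with h | h
    · unfold evtsG at h
      rw [mem_evtsFrom] at h
      obtain ⟨j, _, _, rfl⟩ := h
      simp
    · have := ih (s + 1) e h
      omega

theorem nodup_flat (gs : List (List Int)) : ∀ s : Int,
    ((PySem.List.enumerate gs s).flatMap (fun ig => evtsG ig.1 ig.2)).Nodup := by
  induction gs with
  | nil => intro s; simp [PySem.List.enumerate_nil]
  | cons g t ih =>
    intro s
    rw [PySem.List.enumerate_cons]
    simp only [List.flatMap_cons]
    apply List.Nodup.append (nodup_evtsFrom _ _ _ _) (ih (s + 1))
    intro e he hmem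
    rw [mem_evtsFrom] at he
    obtain ⟨j, _, _, rfl⟩ := he
    have := flat_snd_ge t (s + 1) _ hmem
    simp at this

-- the events that remain available in state lens
def IsEvt (full : List (List Int)) (lens : List Int) (e : Int × Int × Int) : Prop :=
  ∃ i : Nat, i < full.length ∧ e.2.2 = (i : Int) ∧ ∃ L : Nat, 2 ≤ L ∧
    (L : Int) ≤ lens.getD i 0 ∧ e.1 = -(L : Int) ∧ e.2.1 = -((full.getD i []).take L).sum

theorem mem_flat_iff (full : List (List Int)) :
    ∀ e, e ∈ (PySem.List.enumerate full).flatMap (fun ig => evtsG ig.1 ig.2) ↔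
      IsEvt full (full.map (fun g => (g.length : Int))) e := by
  intro e
  rw [List.mem_flatMap]
  unfold IsEvt
  constructor
  · rintro ⟨ig, hig, hmem⟩
    rw [PySem.List.mem_enumerate_iff] at hig
    obtain ⟨k, hk, rfl⟩ := hig
    dsimp only at hmem
    unfold evtsG at hmem
    rw [mem_evtsFrom] at hmem
    obtain ⟨j, hj, h2, rfl⟩ := hmem
    refine ⟨k, hk, by simp, j + 1, by omega, ?_, by push_cast; ring_nf, ?_⟩
    · rw [List.getD_eq_getElem _ _ (by simpa using hk), List.getElem_map]
      push_cast
      omega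
    · rw [List.getD_eq_getElem _ _ hk]
      push_cast
      ring_nf
  · rintro ⟨i, hi, he2, L, hL2, hLle, he1, heS⟩
    rw [List.getD_eq_getElem _ _ (by simpa using hi), List.getElem_map] at hLle
    refine ⟨(0 + (i : Int), full[i]), ?_, ?_⟩
    · rw [PySem.List.mem_enumerate_iff]
      exact ⟨i, hi, rfl⟩
    · dsimp only
      unfold evtsG
      rw [mem_evtsFrom]
      refine ⟨L - 1, by omega, by push_cast [Nat.cast_sub (by omega : 1 ≤ L)]; omega, ?_⟩
      have hcast : (1 : Int) + ((L - 1 : Nat) : Int) = (L : Int) := by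
        push_cast [Nat.cast_sub (by omega : 1 ≤ L)]
        omega
      have hLL : L - 1 + 1 = L := by omega
      rw [hcast, hLL]
      have hfg : full.getD i [] = full[i] := List.getD_eq_getElem _ _ hi
      rw [hfg] at heS
      obtain ⟨a, b, c⟩ := e
      simp only [Prod.mk.injEq]
      simp at he1 he2 heS
      refine ⟨by omega, by omega, by omega⟩

-- the linear rescan finds the event-order minimum among available groups
theorem bScan_eq (k : Nat) (lens sums : List Int) (i : Nat) (hik : i < k)
    (hL : 1 < lens.getD i 0)
    (hmin : ∀ j : Nat, j < k → 1 < lens.getD j 0 →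
      lens.getD j 0 < lens.getD i 0 ∨ (lens.getD j 0 = lens.getD i 0 ∧
        (sums.getD j 0 < sums.getD i 0 ∨ (sums.getD j 0 = sums.getD i 0 ∧ i ≤ j)))) :
    bScan k lens sums = ((i : Int), lens.getD i 0, sums.getD i 0) := by
  unfold bScan
  have phase1 : ∀ (lst : List Int), (∀ x ∈ lst, 0 ≤ x ∧ x < (i : Int)) →
      ∀ st : Int × Int × Int,
      (st.2.1 < lens.getD i 0 ∨ (lens.getD i 0 = st.2.1 ∧ st.2.2 < sums.getD i 0)) →
      (let r := lst.foldl (fun st x =>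
          let l := PySem.List.pyGetD lens x 0
          let s := PySem.List.pyGetD sums x 0
          if 1 < l ∧ (st.2.1 < l ∨ (l = st.2.1 ∧ st.2.2 < s)) then (x, l, s) else st) st
       r.2.1 < lens.getD i 0 ∨ (lens.getD i 0 = r.2.1 ∧ r.2.2 < sums.getD i 0)) := by
    intro lst
    induction lst with
    | nil => intro _ st hst; exact hst
    | cons x t ihp =>
      intro hx st hst
      simp only [List.foldl_cons]
      apply ihp (fun y hy => hx y (by simp [hy]))
      have hx0 := (hx x (by simp)).1
      have hxi := (hx x (by simp)).2
      simp only [PySem.List.pyGetD_of_nonneg _ _ hx0]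
      by_cases hc : 1 < lens.getD x.toNat 0 ∧
          (st.2.1 < lens.getD x.toNat 0 ∨
            (lens.getD x.toNat 0 = st.2.1 ∧ st.2.2 < sums.getD x.toNat 0))
      · rw [if_pos hc]
        rcases hmin x.toNat (by omega) hc.1 with h | ⟨h1, h2 | ⟨h2, h3⟩⟩
        · left; exact h
        · right; exact ⟨h1.symm, h2⟩
        · omega
      · rw [if_neg hc]; exact hst
  have phase3 : ∀ (lst : List Int), (∀ x ∈ lst, (i : Int) < x ∧ x < (k : Int)) →
      lst.foldl (fun st x =>
          let l := PySem.List.pyGetD lens x 0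
          let s := PySem.List.pyGetD sums x 0
          if 1 < l ∧ (st.2.1 < l ∨ (l = st.2.1 ∧ st.2.2 < s)) then (x, l, s) else st)
        ((i : Int), lens.getD i 0, sums.getD i 0)
      = ((i : Int), lens.getD i 0, sums.getD i 0) := by
    intro lst
    induction lst with
    | nil => simp
    | cons x t ihp =>
      intro hx
      simp only [List.foldl_cons]
      have hx0 : (0 : Int) ≤ x := by have := (hx x (by simp)).1; omega
      have hxi := (hx x (by simp)).1
      have hxk := (hx x (by simp)).2
      have hstep : (let l := PySem.List.pyGetD lens x 0
          let s := PySem.List.pyGetD sums x 0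
          if 1 < l ∧ (((i : Int), lens.getD i 0, sums.getD i 0).2.1 < l ∨
            (l = ((i : Int), lens.getD i 0, sums.getD i 0).2.1 ∧
              ((i : Int), lens.getD i 0, sums.getD i 0).2.2 < s)) then (x, l, s)
          else ((i : Int), lens.getD i 0, sums.getD i 0)) = ((i : Int), lens.getD i 0, sums.getD i 0) := by
        simp only [PySem.List.pyGetD_of_nonneg _ _ hx0]
        rw [if_neg ?_]
        rintro ⟨hlx, h | ⟨h1, h2⟩⟩
        · rcases hmin x.toNat (by omega) hlx with h' | ⟨h1', _⟩ <;> omega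
        · rcases hmin x.toNat (by omega) hlx with h' | ⟨h1', h2' | ⟨h2', h3'⟩⟩ <;> omega
      rw [hstep]
      exact ihp (fun y hy => hx y (by simp [hy]))
  rw [PySem.List.pyRange_one_append 0 (i : Int) (k : Int) (by omega) (by omega), List.foldl_append]
  have h1 := phase1 (PySem.List.pyRange 0 (i : Int) 1)
    (fun x hx => by rw [PySem.List.mem_pyRange_one] at hx; exact hx) (-1, 0, 0)
    (by left; dsimp only; omega)
  rw [PySem.List.pyRange_one_cons (a := (i : Int)) (b := (k : Int)) (by exact_mod_cast hik)]
  simp only [List.foldl_cons]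
  set st1 := (PySem.List.pyRange 0 (i : Int) 1).foldl (fun st x =>
      let l := PySem.List.pyGetD lens x 0
      let s := PySem.List.pyGetD sums x 0
      if 1 < l ∧ (st.2.1 < l ∨ (l = st.2.1 ∧ st.2.2 < s)) then (x, l, s) else st) (-1, 0, 0) with hst1
  have hstep : (if 1 < PySem.List.pyGetD lens (i : Int) 0 ∧
        (st1.2.1 < PySem.List.pyGetD lens (i : Int) 0 ∨
          (PySem.List.pyGetD lens (i : Int) 0 = st1.2.1 ∧
            st1.2.2 < PySem.List.pyGetD sums (i : Int) 0)) then
        ((i : Int), PySem.List.pyGetD lens (i : Int) 0, PySem.List.pyGetD sums (i : Int) 0)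
      else st1)
      = ((i : Int), lens.getD i 0, sums.getD i 0) := by
    simp only [PySem.List.pyGetD_natCast]
    exact if_pos ⟨hL, h1⟩
  rw [hstep]
  exact phase3 _ (fun x hx => by rw [PySem.List.mem_pyRange_one] at hx; exact hx)

-- the split loop, driven by the precomputed event list
def specLoop (full : List (List Int)) : Nat → List Int → List (List Int) →
    List (Int × Int × Int) → List Int × List (List Int)
  | 0, lens, extra, _ => (lens, extra)
  | _ + 1, lens, extra, [] => (lens, extra)
  | b + 1, lens, extra, e :: rest =>
      specLoop full b (lens.set e.2.2.toNat (lens.getD e.2.2.toNat 0 - 1))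
        (extra ++ [[PySem.List.pyGetD (full.getD e.2.2.toNat []) (-e.1 - 1) 0]]) rest

theorem evKey_le_iff (a b : Int × Int × Int) :
    evKey a ≤ evKey b ↔
      a.1 < b.1 ∨ (a.1 = b.1 ∧ (a.2.1 < b.2.1 ∨ (a.2.1 = b.2.1 ∧ a.2.2 ≤ b.2.2))) := by
  unfold evKey
  rw [Prod.Lex.le_iff]
  simp only [Prod.Lex.le_iff]
  tauto

-- stage 1: the rescan loop consumes exactly the sorted event list, head first
theorem loop_ev (m : Int) (full : List (List Int)) :
    ∀ (fuel : Nat) (lens sums : List Int) (extra : List (List Int))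
      (ev : List (Int × Int × Int)),
    (m - ((full.length : Int) + (extra.length : Int))).toNat = fuel →
    LoopInv full lens sums →
    (∀ e, e ∈ ev ↔ IsEvt full lens e) →
    ev.Pairwise (fun a b => evKey a ≤ evKey b) → ev.Nodup →
    bLoop m full lens sums extra = specLoop full fuel lens extra ev := by
  intro fuel
  induction fuel using Nat.strong_induction_on with
  | _ fuel ih =>
  intro lens sums extra ev hfuel hinv hmem hpw hnd
  obtain ⟨hl, hs, hb, hsum⟩ := hinv
  rw [bLoop]
  by_cases hguard : ((full.length : Int) + (extra.length : Int)) < m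
  · rw [dif_pos hguard]
    obtain ⟨f, rfl⟩ : ∃ f, fuel = f + 1 := ⟨fuel - 1, by omega⟩
    cases ev with
    | nil =>
      have hnone : ∀ j : Nat, j < full.length → ¬ (1 < lens.getD j 0) := by
        intro j hj hgt
        have hm : IsEvt full lens (-(((lens.getD j 0).toNat : Nat) : Int),
            -((full.getD j []).take (lens.getD j 0).toNat).sum, (j : Int)) :=
          ⟨j, hj, rfl, (lens.getD j 0).toNat, by omega, by omega, rfl, rfl⟩
        have := (hmem _).mpr hm
        simp at this
      have hneg : (bScan full.length lens sums).1 < 0 := by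
        rcases bScan_post full.length lens sums with h | ⟨k0, hk1, hk0, _, _, hgt⟩
        · omega
        · exact absurd hgt (hnone k0 hk0)
      rw [if_pos hneg]
      rfl
    | cons e rest =>
      obtain ⟨i, hi, he2, L, hL2, hLle, he1, heS⟩ := (hmem e).mp (by simp)
      have hbi := hb i hi
      have hLi : (L : Int) = lens.getD i 0 := by
        have htop : IsEvt full lens (-(((lens.getD i 0).toNat : Nat) : Int),
            -((full.getD i []).take (lens.getD i 0).toNat).sum, (i : Int)) :=
          ⟨i, hi, rfl, (lens.getD i 0).toNat, by omega, by omega, rfl, rfl⟩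
        rcases List.mem_cons.mp ((hmem _).mpr htop) with heq | hrest
        · have := congrArg Prod.fst heq
          simp only at this
          rw [he1] at this
          omega
        · have hle := (List.pairwise_cons.mp hpw).1 _ hrest
          rw [evKey_le_iff] at hle
          simp only [he1] at hle
          omega
      have hLnat : (lens.getD i 0).toNat = L := by omega
      have heS' : e.2.1 = -(sums.getD i 0) := by
        rw [heS, hsum i hi, hLnat]
      have hmin : ∀ j : Nat, j < full.length → 1 < lens.getD j 0 →
          lens.getD j 0 < lens.getD i 0 ∨ (lens.getD j 0 = lens.getD i 0 ∧
            (sums.getD j 0 < sums.getD i 0 ∨ (sums.getD j 0 = sums.getD i 0 ∧ i ≤ j))) := by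
        intro j hj hgt
        have hmj : IsEvt full lens (-(((lens.getD j 0).toNat : Nat) : Int),
            -((full.getD j []).take (lens.getD j 0).toNat).sum, (j : Int)) :=
          ⟨j, hj, rfl, (lens.getD j 0).toNat, by omega, by omega, rfl, rfl⟩
        rcases List.mem_cons.mp ((hmem _).mpr hmj) with heq | hrest
        · have h3 := congrArg (fun q => q.2.2) heq
          simp only at h3
          rw [he2] at h3
          have hji : j = i := by exact_mod_cast h3
          subst hji
          right
          exact ⟨rfl, Or.inr ⟨rfl, le_refl _⟩⟩
        · have hle := (List.pairwise_cons.mp hpw).1 _ hrest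
          rw [evKey_le_iff] at hle
          simp only [he1, heS', he2] at hle
          rw [← hsum j hj] at hle
          omega
      have hscan := bScan_eq full.length lens sums i hi (by omega) hmin
      rw [hscan]
      rw [if_neg (by omega)]
      simp only [PySem.List.pySetD_natCast, PySem.List.pyGetD_natCast]
      have hidx : e.2.2.toNat = i := by rw [he2]; simp
      have hbook : -e.1 - 1 = lens.getD i 0 - 1 := by rw [he1]; omega
      -- name the popped book
      set book := PySem.List.pyGetD (full.getD i []) (lens.getD i 0 - 1) 0 with hbdef
      have hspec : specLoop full (f + 1) lens extra (e :: rest)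
          = specLoop full f (lens.set i (lens.getD i 0 - 1)) (extra ++ [[book]]) rest := by
        rw [specLoop, hidx, hbook, hbdef]
      rw [hspec]
      set lens' := lens.set i (lens.getD i 0 - 1) with hlens'
      set sums' := sums.set i (sums.getD i 0 - book) with hsums'
      -- the book is the element at position lens_i - 1
      obtain ⟨n1, hn1⟩ : ∃ n1, (lens.getD i 0).toNat = n1 + 1 := ⟨(lens.getD i 0).toNat - 1, by omega⟩
      have hn1len : n1 < (full.getD i []).length := by omega
      have hbookval : book = (full.getD i [])[n1] := by
        rw [hbdef, PySem.List.pyGetD_of_nonneg _ _ (by omega)]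
        have : (lens.getD i 0 - 1).toNat = n1 := by omega
        rw [this]
        exact List.getD_eq_getElem _ _ hn1len
      have hinv' : LoopInv full lens' sums' := by
        refine ⟨by simp [hlens', hl], by simp [hsums', hs], ?_, ?_⟩
        · intro q hq
          by_cases hqi : q = i
          · subst hqi
            have h1 : lens'.getD q 0 = lens.getD q 0 - 1 := by
              rw [hlens']; exact getD_set_self' _ _ _ (by omega)
            rw [h1]
            constructor <;> omega
          · have h1 : lens'.getD q 0 = lens.getD q 0 := by
              rw [hlens']; exact getD_set_ne' _ _ _ _ hqi
            rw [h1]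
            exact hb q hq
        · intro q hq
          by_cases hqi : q = i
          · subst hqi
            have h1 : lens'.getD q 0 = lens.getD q 0 - 1 := by
              rw [hlens']; exact getD_set_self' _ _ _ (by omega)
            have h2 : sums'.getD q 0 = sums.getD q 0 - book := by
              rw [hsums']; exact getD_set_self' _ _ _ (by omega)
            have h4 := List.sum_take_succ (full.getD q []) n1 hn1len
            rw [← hn1] at h4
            have h5 : (lens.getD q 0 - 1).toNat = n1 := by omega
            rw [h1, h2, h5, hsum q hq, hbookval]
            omega
          · have h1 : lens'.getD q 0 = lens.getD q 0 := by
              rw [hlens']; exact getD_set_ne' _ _ _ _ hqi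
            have h2 : sums'.getD q 0 = sums.getD q 0 := by
              rw [hsums']; exact getD_set_ne' _ _ _ _ hqi
            rw [h1, h2]
            exact hsum q hq
      have hmem' : ∀ e', e' ∈ rest ↔ IsEvt full lens' e' := by
        intro e'
        constructor
        · intro hr
          obtain ⟨i', hi', he2', L', hL2', hLle', he1', heS'2⟩ := (hmem e').mp (by simp [hr])
          by_cases hii : i' = i
          · subst hii
            have hne : e' ≠ e := fun hh => (List.nodup_cons.mp hnd).1 (hh ▸ hr)
            have hlt : (L' : Int) < lens.getD i' 0 := by
              rcases lt_or_eq_of_le hLle' with h | h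
              · exact h
              · exfalso
                apply hne
                have : L' = L := by omega
                subst this
                obtain ⟨a, b, c⟩ := e'
                obtain ⟨a', b', c'⟩ := e
                simp only at he1 he2 heS he1' he2' heS'2
                simp [he1, he2, heS, he1', he2', heS'2]
            refine ⟨i', hi', he2', L', hL2', ?_, he1', heS'2⟩
            rw [hlens', getD_set_self' _ _ _ (by omega)]
            omega
          · refine ⟨i', hi', he2', L', hL2', ?_, he1', heS'2⟩
            rw [hlens', getD_set_ne' _ _ _ _ hii]
            exact hLle'
        · rintro ⟨i', hi', he2', L', hL2', hLle', he1', heS'2⟩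
          have hLle'' : (L' : Int) ≤ lens.getD i' 0 := by
            by_cases hii : i' = i
            · subst hii
              rw [hlens', getD_set_self' _ _ _ (by omega)] at hLle'
              omega
            · rwa [hlens', getD_set_ne' _ _ _ _ hii] at hLle'
          have hmem0 : e' ∈ e :: rest := (hmem e').mpr ⟨i', hi', he2', L', hL2', hLle'', he1', heS'2⟩
          rcases List.mem_cons.mp hmem0 with heq | hr
          · exfalso
            have h3 : (i' : Int) = (i : Int) := by rw [← he2', heq, he2]
            have hii : i' = i := by exact_mod_cast h3
            subst hii
            rw [hlens', getD_set_self' _ _ _ (by omega)] at hLle'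
            have : e'.1 = e.1 := by rw [heq]
            rw [he1', he1] at this
            omega
          · exact hr
      exact ih f (by omega) lens' sums' (extra ++ [[book]]) rest (by simp; omega) hinv' hmem'
        (List.pairwise_cons.mp hpw).2 (List.nodup_cons.mp hnd).2
  · rw [dif_neg hguard]
    have : fuel = 0 := by omega
    subst this
    rfl

-- stage 2: specLoop in closed form over the taken prefix
theorem specLoop_eq (full : List (List Int)) : ∀ (fuel : Nat) (lens : List Int)
    (extra : List (List Int)) (ev : List (Int × Int × Int)),
    specLoop full fuel lens extra ev =
      ((ev.take fuel).foldl (fun l e => l.set e.2.2.toNat (l.getD e.2.2.toNat 0 - 1)) lens,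
       extra ++ (ev.take fuel).map
         (fun e => [PySem.List.pyGetD (full.getD e.2.2.toNat []) (-e.1 - 1) 0])) := by
  intro fuel
  induction fuel with
  | zero => intro lens extra ev; simp [specLoop]
  | succ b ih =>
    intro lens extra ev
    cases ev with
    | nil => simp [specLoop]
    | cons e rest => simp [specLoop, ih, List.take_succ_cons]

theorem foldl_dec_getD (es : List (Int × Int × Int)) : ∀ (l : List Int) (j : Nat),
    (∀ e ∈ es, 0 ≤ e.2.2 ∧ e.2.2.toNat < l.length) →
    (es.foldl (fun l e => l.set e.2.2.toNat (l.getD e.2.2.toNat 0 - 1)) l).getD j 0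
      = l.getD j 0 - (es.countP (fun e => e.2.2.toNat == j) : Int) ∧
    (es.foldl (fun l e => l.set e.2.2.toNat (l.getD e.2.2.toNat 0 - 1)) l).length
      = l.length := by
  induction es with
  | nil => intro l j h; simp
  | cons e t ih =>
    intro l j h
    simp only [List.foldl_cons]
    have he := h e (by simp)
    obtain ⟨ih1, ih2⟩ := ih (l.set e.2.2.toNat (l.getD e.2.2.toNat 0 - 1)) j
      (fun x hx => by
        refine ⟨(h x (by simp [hx])).1, ?_⟩
        rw [List.length_set]
        exact (h x (by simp [hx])).2)
    refine ⟨?_, by rw [ih2, List.length_set]⟩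
    rw [ih1, List.countP_cons]
    by_cases hej : e.2.2.toNat = j
    · rw [hej, getD_set_self' _ _ _ (hej ▸ he.2)]
      simp
      omega
    · rw [getD_set_ne' _ _ _ _ (fun hh => hej hh.symm)]
      simp [hej]

theorem foldl_inc_getD (es : List (Int × Int × Int)) : ∀ (l : List Int) (j : Nat),
    (∀ e ∈ es, 0 ≤ e.2.2 ∧ e.2.2.toNat < l.length) →
    (es.foldl (fun l e => l.set e.2.2.toNat (l.getD e.2.2.toNat 0 + 1)) l).getD j 0
      = l.getD j 0 + (es.countP (fun e => e.2.2.toNat == j) : Int) := by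
  induction es with
  | nil => intro l j h; simp
  | cons e t ih =>
    intro l j h
    simp only [List.foldl_cons]
    have he := h e (by simp)
    have ih1 := ih (l.set e.2.2.toNat (l.getD e.2.2.toNat 0 + 1)) j
      (fun x hx => by
        refine ⟨(h x (by simp [hx])).1, ?_⟩
        rw [List.length_set]
        exact (h x (by simp [hx])).2)
    rw [ih1, List.countP_cons]
    by_cases hej : e.2.2.toNat = j
    · rw [hej, getD_set_self' _ _ _ (hej ▸ he.2)]
      simp
      omega
    · rw [getD_set_ne' _ _ _ _ (fun hh => hej hh.symm)]
      simp [hej]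

-- ===== VERDICT (by name: the statement is the Claim_ definition above) =====
theorem get_allocation_details_spec : Claim_equal_get_allocation_details := by
  unfold Claim_equal_get_allocation_details
  intro pages m max_allowed _
  unfold Spec_get_allocation_details
  unfold get_allocation_details get_allocation_details_alt
  by_cases hm : m = (pages.length : Int)
  · rw [if_pos hm, if_pos hm]
    apply List.ext_getElem (by simp [PySem.List.length_pyRange_one])
    intro i h1 h2
    have hi : i < pages.length := by simpa using h2
    simp only [List.getElem_map]
    rw [PySem.List.getElem_pyRange_one]
    simp only [zero_add, PySem.List.pyGetD_natCast]
    rw [List.getD_eq_getElem _ _ hi]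
  · rw [if_neg hm, if_neg hm]
    obtain ⟨h1, h2, h3, h4⟩ := greedy_inv max_allowed pages
    set gs := bGreedy max_allowed pages with hgs
    set full := gs.map (·.1) with hfull
    set lens0 := full.map (fun g => (g.length : Int)) with hlens0
    set sums0 := gs.map (·.2) with hsums0
    have hB2 : bGreedy2 max_allowed pages = (full, sums0) := by
      rw [bGreedy2_eq]
    rw [hB2]
    have hlfull : lens0.length = full.length := by simp [hlens0]
    have hsfull : sums0.length = full.length := by simp [hsums0, hfull]
    have hlget : ∀ i, i < full.length → lens0.getD i 0 = ((full.getD i []).length : Int) := by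
      intro i hi
      rw [hlens0, List.getD_eq_getElem _ _ (by simpa using hi),
        List.getD_eq_getElem _ _ hi, List.getElem_map]
    have hinv : LoopInv full lens0 sums0 := by
      refine ⟨hlfull, hsfull, ?_, ?_⟩
      · intro i hi
        rw [hlget i hi]
        have hig : i < gs.length := by
          have : full.length = gs.length := by simp [hfull]
          omega
        have hne : full.getD i [] ≠ [] := by
          have hgi : full.getD i [] = gs[i].1 := by
            rw [List.getD_eq_getElem _ _ hi]
            simp [hfull]
          rw [hgi]
          exact (h2 _ (List.getElem_mem hig)).1
        have : 0 < (full.getD i []).length := List.length_pos_iff.mpr hne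
        omega
      · intro i hi
        rw [hlget i hi, Int.toNat_natCast, List.take_length]
        have higs : i < gs.length := by
          have : full.length = gs.length := by simp [hfull]
          omega
        have e1 : sums0.getD i 0 = gs[i].2 := by
          rw [List.getD_eq_getElem _ _ (by simp [hsums0]; omega)]
          simp [hsums0]
        have e2 : full.getD i [] = gs[i].1 := by
          rw [List.getD_eq_getElem _ _ hi]
          simp [hfull]
        rw [e1, e2]
        exact (h2 _ (List.getElem_mem higs)).2
    have hout0 : outOf full lens0 [] = full := by
      unfold outOf
      rw [List.append_nil]
      apply List.ext_getElem (by simp)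
      intro i hi1 hi2
      simp only [List.getElem_map, List.getElem_range]
      rw [hlget i (by simpa using hi2), Int.toNat_natCast, List.take_length,
        List.getD_eq_getElem _ _ (by simpa using hi2)]
    -- the sorted event list
    set ev := PySem.List.sorted (bEvents full) evKey false with hev
    have hmemev : ∀ e, e ∈ ev ↔ IsEvt full lens0 e := by
      intro e
      rw [hev, PySem.List.mem_sorted, bEvents_eq]
      exact mem_flat_iff full e
    have hpw : ev.Pairwise (fun a b => evKey a ≤ evKey b) := PySem.List.sorted_pairwise _ _
    have hndflat : (bEvents full).Nodup := by
      rw [bEvents_eq]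
      exact nodup_flat full 0
    have hndev : ev.Nodup := ((PySem.List.sorted_perm _ _ _).nodup_iff).mpr hndflat
    set fuel := (m - (full.length : Int)).toNat with hfuelDef
    have hloopev := loop_ev m full fuel lens0 sums0 [] ev (by simp [hfuelDef]) hinv hmemev hpw hndev
    obtain ⟨hloop, hnn⟩ := loop_eq_aux m full fuel lens0 sums0 [] (by simp [hfuelDef]) hinv (by simp)
    rw [← h1]
    conv_lhs => rw [← hout0]
    rw [hloop, hloopev, specLoop_eq]
    -- B side: take, pops, extras
    have hTake : bTake full m = ev.take fuel := by
      unfold bTake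
      split_ifs with h
      · rw [← hev, PySem.List.slice_to _ (by omega)]
      · have h0 : fuel = 0 := by omega
        rw [h0]
        simp
    rw [hTake]
    have htkmem : ∀ e ∈ ev.take fuel, 0 ≤ e.2.2 ∧ e.2.2.toNat < full.length := by
      intro e he'
      obtain ⟨i, hi, he2, _⟩ := (hmemev e).mp (List.mem_of_mem_take he')
      rw [he2]
      exact ⟨by omega, by simpa using hi⟩
    have hPE : bPopsExtras full (ev.take fuel) =
        ((ev.take fuel).foldl (fun l e => l.set e.2.2.toNat (l.getD e.2.2.toNat 0 + 1))
            (List.replicate full.length 0),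
         (ev.take fuel).map
           (fun e => [PySem.List.pyGetD (full.getD e.2.2.toNat []) (-e.1 - 1) 0])) := by
      unfold bPopsExtras
      have hcg : (ev.take fuel).foldl (fun (st : List Int × List (List Int)) e =>
          (PySem.List.pySetD st.1 e.2.2 (PySem.List.pyGetD st.1 e.2.2 0 + 1),
           st.2 ++ [[PySem.List.pyGetD (PySem.List.pyGetD full e.2.2 []) (-e.1 - 1) 0]]))
          (List.replicate full.length 0, [])
        = (ev.take fuel).foldl (fun (st : List Int × List (List Int)) e =>
          (st.1.set e.2.2.toNat (st.1.getD e.2.2.toNat 0 + 1),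
           st.2 ++ [[PySem.List.pyGetD (full.getD e.2.2.toNat []) (-e.1 - 1) 0]]))
          (List.replicate full.length 0, []) := by
        apply PySem.List.foldl_congr_mem
        intro acc x hx
        obtain ⟨hx0, _⟩ := htkmem x hx
        rw [PySem.List.pySetD_of_nonneg _ _ hx0, PySem.List.pyGetD_of_nonneg acc.1 _ hx0,
          PySem.List.pyGetD_of_nonneg full _ hx0]
      rw [hcg, PySem.List.foldl_prod_mk
        (f := fun (l : List Int) (e : Int × Int × Int) => l.set e.2.2.toNat (l.getD e.2.2.toNat 0 + 1))
        (g := fun (x : List (List Int)) (e : Int × Int × Int) =>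
          x ++ [[PySem.List.pyGetD (full.getD e.2.2.toNat []) (-e.1 - 1) 0]]),
        PySem.List.foldl_append_singleton_eq_map]
      simp
    rw [hPE]
    -- the two extras lists coincide; compare the prefix parts pointwise
    unfold outOf
    simp only [List.nil_append]
    congr 1
    have hmemlens : ∀ e ∈ ev.take fuel, 0 ≤ e.2.2 ∧ e.2.2.toNat < lens0.length := by
      intro e he'
      obtain ⟨hx0, hxlt⟩ := htkmem e he'
      exact ⟨hx0, by omega⟩
    apply List.ext_getElem (by simp)
    intro q hq1 hq2
    have hqf : q < full.length := by simpa using hq2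
    simp only [List.getElem_map, List.getElem_range, PySem.List.getElem_enumerate]
    obtain ⟨hdec, hdlen⟩ := foldl_dec_getD (ev.take fuel) lens0 q hmemlens
    have hinc := foldl_inc_getD (ev.take fuel) (List.replicate full.length 0) q
      (fun e he' => ⟨(htkmem e he').1, by simpa using (htkmem e he').2⟩)
    have hrep : (List.replicate full.length (0 : Int)).getD q 0 = 0 := by
      rw [List.getD_eq_getElem _ _ (by simpa using hqf)]
      simp
    have hval : ((full[q].length : Int) - PySem.List.pyGetD
        ((ev.take fuel).foldl (fun l e => l.set e.2.2.toNat (l.getD e.2.2.toNat 0 + 1))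
          (List.replicate full.length 0)) (0 + (q : Int)) 0)
        = ((ev.take fuel).foldl (fun l e => l.set e.2.2.toNat (l.getD e.2.2.toNat 0 - 1)) lens0).getD q 0 := by
      rw [hdec]
      have : (0 : Int) + (q : Int) = ((q : Nat) : Int) := by omega
      rw [this, PySem.List.pyGetD_natCast, hinc, hrep]
      rw [hlget q hqf, List.getD_eq_getElem _ _ hqf]
      omega
    rw [hval]
    set lensF := (ev.take fuel).foldl (fun l e => l.set e.2.2.toNat (l.getD e.2.2.toNat 0 - 1)) lens0 with hlensF
    have hnn' : 0 ≤ lensF.getD q 0 := by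
      have hq' : q < lensF.length := by rw [hdlen]; omega
      have := hnn (lensF.getD q 0) (by
        rw [List.getD_eq_getElem _ _ hq']
        rw [hloopev, specLoop_eq]
        exact List.getElem_mem hq')
      exact this
    rw [PySem.List.slice_to _ hnn']
    rw [List.getD_eq_getElem _ _ hqf]
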